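-- pv_equiv track=rewrite | github.com/FilippKuzenkov/Outlook-Signature-Extraction-Engine | signature_extractor.py | _old_trim_signature_lines
-- ===== SOURCE A (Python) =====
-- from typing import List, Optional
--
-- _SIGNOFF_PHRASES: tuple[str, ...] = (
--     # English
--     "best regards",
--     "kind regards",
--     "regards",
--     "thanks and regards",
--     "many thanks",
--     "with best regards",
--     "sincerely",
--     "yours sincerely",
--     "yours faithfully",
--     # German
--     "mit freundlichen grüßen",
--     "mit freundlichen gruessen",
--     "mit freundlichen grussen",
--     "freundliche grüße",
--     "freundliche grüsse",
--     "viele grüße",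
--     "viele grüsse",
--     "beste grüße",
--     "beste grüsse",
--     "herzliche grüße",
--     "herzliche grüsse",
--     # very short variants
--     "mfg",
--     "vhb",
--     "br,",  # "best regards" style abbreviations
-- )
--
-- def _old_trim_signature_lines(lines: List[str]) -> List[str]:
--     """
--     Previous Phase-1 behaviour, kept as a fallback:
--
--         - look for a sign-off phrase,
--         - once found, start collecting all *following* lines as signature.
--
--     If no sign-off is found at all, fall back to a simple
--     "last N lines" heuristic.
--     """
--     if not lines:
--         return []
--
--     collected: List[str] = []
--     started = False
--
--     for line in lines:
--         ll = line.lower()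
--
--         if any(phrase in ll for phrase in _SIGNOFF_PHRASES):
--             started = True
--             # we *skip* the sign-off line itself, same as before
--             continue
--
--         if started:
--             collected.append(line)
--
--     # Fallback: if nothing was collected, take the bottom N lines.
--     if not collected:
--         n = len(lines)
--         if n <= 13:
--             return list(lines)
--         return lines[-13:]
--
--     return collected
-- ===== SOURCE B (Python) =====
-- from typing import List
--
-- _SIGNOFF_PHRASES: tuple = (
--     "best regards", "kind regards", "regards", "thanks and regards",
--     "many thanks", "with best regards", "sincerely", "yours sincerely",
--     "yours faithfully",
--     "mit freundlichen gr\u00fc\u00dfen", "mit freundlichen gruessen",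
--     "mit freundlichen grussen", "freundliche gr\u00fc\u00dfe",
--     "freundliche gr\u00fcsse", "viele gr\u00fc\u00dfe", "viele gr\u00fcsse",
--     "beste gr\u00fc\u00dfe", "beste gr\u00fcsse", "herzliche gr\u00fc\u00dfe",
--     "herzliche gr\u00fcsse",
--     "mfg", "vhb", "br,",
-- )
--
--
-- def _is_signoff(line: str) -> bool:
--     ll = line.lower()
--     return any(p in ll for p in _SIGNOFF_PHRASES)
--
--
-- def _old_trim_signature_lines(lines: List[str]) -> List[str]:
--     # A line belongs to the signature iff it is not itself a sign-off line and
--     # some sign-off line precedes it.  Build the result back-to-front in ONE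
--     # reverse traversal: non-sign-off lines wait in `pending`; each time a
--     # sign-off line is reached, everything pending (all of it lies after that
--     # sign-off) is committed to the front of `collected`.
--     if not lines:
--         return []
--     collected_rev: List[str] = []
--     pending: List[str] = []
--     for line in reversed(lines):
--         if _is_signoff(line):
--             collected_rev.extend(pending)
--             pending = []
--         else:
--             pending.append(line)
--     collected = collected_rev[::-1]
--     if collected:
--         return collected
--     # fallback: no sign-off found, or nothing kept after one
--     return list(lines) if len(lines) <= 13 else lines[-13:]
-- ===== Notes on version B (the rewrite author's own statement) =====
-- stated objective: alternative
-- what changed: Builds the result back-to-front in a single reverse traversal with a pending buffer that is committed to the output whenever a sign-off line is reached, instead of A's forward pass with a 'started' flag; correct because a line is kept iff it is not a sign-off and some sign-off precedes it.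
import Mathlib
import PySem

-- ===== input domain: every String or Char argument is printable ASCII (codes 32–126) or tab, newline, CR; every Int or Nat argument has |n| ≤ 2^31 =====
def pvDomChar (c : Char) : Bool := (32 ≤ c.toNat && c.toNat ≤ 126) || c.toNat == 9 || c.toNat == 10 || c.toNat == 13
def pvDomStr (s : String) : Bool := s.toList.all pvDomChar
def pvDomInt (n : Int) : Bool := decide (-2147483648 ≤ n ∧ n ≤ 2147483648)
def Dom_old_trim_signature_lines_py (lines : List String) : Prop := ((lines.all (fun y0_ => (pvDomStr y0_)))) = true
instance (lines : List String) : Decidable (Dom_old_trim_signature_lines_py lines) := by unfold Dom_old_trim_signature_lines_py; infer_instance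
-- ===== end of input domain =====

-- ===== PORT A =====
-- B builds the result back-to-front in one reverse traversal with a pending buffer,
-- instead of A's forward pass with a 'started' flag; same cost, different algorithmic shape.

-- shared module constant _SIGNOFF_PHRASES
def pvSignoffPhrases : List String :=
  ["best regards", "kind regards", "regards", "thanks and regards",
   "many thanks", "with best regards", "sincerely", "yours sincerely",
   "yours faithfully",
   "mit freundlichen grüßen", "mit freundlichen gruessen",
   "mit freundlichen grussen", "freundliche grüße",
   "freundliche grüsse", "viele grüße", "viele grüsse",
   "beste grüße", "beste grüsse", "herzliche grüße",
   "herzliche grüsse",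
   "mfg", "vhb", "br,"]

-- 'any(phrase in line.lower() for phrase in _SIGNOFF_PHRASES)' (identical test in both sources)
def pvIsSignoff (line : String) : Bool :=
  pvSignoffPhrases.any (fun p => PySem.Str.isIn p (PySem.Str.lower line))

def old_trim_signature_lines_py (lines : List String) : List String :=
  if lines = [] then []
  else
    let st := lines.foldl
      (fun (st : List String × Bool) line =>
        if pvIsSignoff line then (st.1, true)
        else if st.2 then (st.1 ++ [line], st.2)
        else st)
      ([], false)
    if st.1 = [] then
      if (lines.length : Int) ≤ 13 then lines
      else PySem.List.slice lines (some (-13)) none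
    else st.1

-- ===== PORT B =====
-- B's loop body: st = (collected_rev, pending), both held in reversed order; on a
-- sign-off line the pending buffer is flushed into collected_rev, else the line is appended.
def pvRevStep (st : List String × List String) (line : String) : List String × List String :=
  if pvIsSignoff line then (st.1 ++ st.2, [])
  else (st.1, st.2 ++ [line])

def old_trim_signature_lines_py_alt (lines : List String) : List String :=
  if lines = [] then []
  else
    let st := lines.reverse.foldl pvRevStep ([], [])
    let collected := st.1.reverse
    if collected ≠ [] then collected
    else if (lines.length : Int) ≤ 13 then lines
    else PySem.List.slice lines (some (-13)) none

-- ===== PRECONDITION & SPEC =====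
def Spec_old_trim_signature_lines_py (lines : List String) (out : List String) : Prop := out = old_trim_signature_lines_py_alt lines
instance (lines : List String) (out : List String) : Decidable (Spec_old_trim_signature_lines_py lines out) := by unfold Spec_old_trim_signature_lines_py; infer_instance

-- ===== CLAIM (what is proved, stated in full; the proofs are below) =====
def Claim_equal_old_trim_signature_lines_py : Prop := ∀ (lines : List String), Dom_old_trim_signature_lines_py lines → Spec_old_trim_signature_lines_py lines (old_trim_signature_lines_py lines)

-- ===== LEMMAS AND PROOFS =====

-- the loop body of A
def pvStepA (st : List String × Bool) (line : String) : List String × Bool :=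
  if pvIsSignoff line then (st.1, true)
  else if st.2 then (st.1 ++ [line], st.2)
  else st

-- once started, A appends exactly the non-sign-off lines
theorem pvFoldStarted (ls : List String) (acc : List String) :
    ls.foldl pvStepA (acc, true) = (acc ++ ls.filter (fun l => !pvIsSignoff l), true) := by
  induction ls generalizing acc with
  | nil => simp
  | cons l ls ih =>
      by_cases h : pvIsSignoff l = true
      · simp [List.foldl_cons, pvStepA, h, ih]
      · simp only [Bool.not_eq_true] at h
        simp [List.foldl_cons, pvStepA, h, ih]

-- before starting, A's collected list is the filtered suffix after the first sign-off line
theorem pvFoldUnstarted (ls : List String) (acc : List String) :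
    (ls.foldl pvStepA (acc, false)).1
      = acc ++ (ls.drop (((ls.findIdx? (fun l => pvIsSignoff l)).getD ls.length) + 1)).filter
          (fun l => !pvIsSignoff l) := by
  induction ls generalizing acc with
  | nil => simp
  | cons l ls ih =>
      by_cases h : pvIsSignoff l = true
      · simp [List.foldl_cons, pvStepA, h, pvFoldStarted, List.findIdx?_cons]
      · simp only [Bool.not_eq_true] at h
        cases hf : ls.findIdx? (fun l => pvIsSignoff l) with
        | none =>
            simp [List.foldl_cons, pvStepA, h, ih, List.findIdx?_cons, hf,
              List.drop_eq_nil_of_le]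
        | some i =>
            simp [List.foldl_cons, pvStepA, h, ih, List.findIdx?_cons, hf]

-- when no line is a sign-off, the filter keeps everything
theorem pvFilterNone (ls : List String)
    (hf : ls.findIdx? (fun l => pvIsSignoff l) = none) :
    ls.filter (fun l => !pvIsSignoff l) = ls := by
  rw [List.filter_eq_self]
  intro a ha
  have := List.findIdx?_eq_none_iff.mp hf a ha
  simp [this]

-- filtering splits around the first sign-off line
theorem pvFilterSplit (ls : List String) :
    ls.filter (fun l => !pvIsSignoff l)
      = ls.take ((ls.findIdx? (fun l => pvIsSignoff l)).getD ls.length)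
        ++ (ls.drop (((ls.findIdx? (fun l => pvIsSignoff l)).getD ls.length) + 1)).filter
            (fun l => !pvIsSignoff l) := by
  induction ls with
  | nil => simp
  | cons l ls ih =>
      by_cases h : pvIsSignoff l = true
      · simp [List.findIdx?_cons, h]
      · simp only [Bool.not_eq_true] at h
        cases hf : ls.findIdx? (fun l => pvIsSignoff l) with
        | none =>
            simp [List.findIdx?_cons, hf, h, pvFilterNone ls hf,
              List.drop_eq_nil_of_le]
        | some i =>
            have := ih
            simp [List.findIdx?_cons, hf, h] at this ⊢
            exact this

-- B's reverse fold computes (filtered suffix after the first sign-off, prefix before it)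
theorem pvRevFoldChar (ls : List String) :
    ls.reverse.foldl pvRevStep ([], [])
      = (((ls.drop (((ls.findIdx? (fun l => pvIsSignoff l)).getD ls.length) + 1)).filter
          (fun l => !pvIsSignoff l)).reverse,
         (ls.take ((ls.findIdx? (fun l => pvIsSignoff l)).getD ls.length)).reverse) := by
  rw [List.foldl_reverse]
  induction ls with
  | nil => simp
  | cons l ls ih =>
      rw [List.foldr_cons, ih]
      by_cases h : pvIsSignoff l = true
      · simp only [pvRevStep, h, if_true]
        simp only [List.findIdx?_cons, h, if_true, Option.getD_some,
          List.drop_succ_cons, List.drop_zero, List.take_zero, List.reverse_nil]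
        rw [pvFilterSplit ls, List.reverse_append]
      · simp only [Bool.not_eq_true] at h
        cases hf : ls.findIdx? (fun l => pvIsSignoff l) with
        | none =>
            simp only [pvRevStep, h]
            simp [List.findIdx?_cons, h, hf, List.drop_eq_nil_of_le]
        | some i =>
            simp only [pvRevStep, h]
            simp [List.findIdx?_cons, h, hf]

-- ===== VERDICT (by name: the statement is the Claim_ definition above) =====
theorem old_trim_signature_lines_py_spec : Claim_equal_old_trim_signature_lines_py := by
  intro lines _
  unfold Spec_old_trim_signature_lines_py old_trim_signature_lines_py old_trim_signature_lines_py_alt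
  by_cases hnil : lines = []
  · simp [hnil]
  · simp only [hnil, if_false, ite_not]
    have hA := pvFoldUnstarted lines []
    have hfold : lines.foldl
        (fun (st : List String × Bool) line =>
          if pvIsSignoff line then (st.1, true)
          else if st.2 then (st.1 ++ [line], st.2)
          else st) ([], false) = lines.foldl pvStepA ([], false) := rfl
    rw [hfold, hA, pvRevFoldChar]
    simp only [List.nil_append, List.reverse_reverse]
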